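-- pv_equiv track=rewrite | github.com/PaperBackPear3/adventofcode | 2023/day5/part2.py | get_steps_maps_from_lines
-- ===== SOURCE A (Python) =====
-- def get_steps_maps_from_lines(lines):
--     steps = []
--     index = 0
--     prev_line_key = ""
--     for line in lines:
--         if line != "":
--             if index == 0:
--                 steps.append([])
--             if index > 0:
--                 steps[-1].append(
--                     [
--                         int(character)
--                         for character in line.split()
--                         if character.isdigit()
--                     ]
--                 )
--
--             index += 1
--         else:
--             index = 0
--     return steps
-- ===== SOURCE B (Python) =====
-- def get_steps_maps_from_lines(lines):
--     # Split into maximal runs of consecutive non-empty lines, then process each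
--     # run: drop its header line, parse each remaining line's digit-only tokens.
--     groups = []
--     run = []
--     for line in lines:
--         if line == "":
--             if run:
--                 groups.append(run)
--                 run = []
--         else:
--             run.append(line)
--     if run:
--         groups.append(run)
--     return [[[int(c) for c in line.split() if c.isdigit()] for line in g[1:]]
--             for g in groups]
-- ===== Notes on version B (the rewrite author's own statement) =====
-- stated objective: alternative
-- what changed: Replaces A's index/reset state machine (mutating the last block in place) with an explicit two-phase decomposition: first split lines into maximal runs of non-empty lines, then map each run to a block by dropping the header and parsing the rest.
import Mathlib
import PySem

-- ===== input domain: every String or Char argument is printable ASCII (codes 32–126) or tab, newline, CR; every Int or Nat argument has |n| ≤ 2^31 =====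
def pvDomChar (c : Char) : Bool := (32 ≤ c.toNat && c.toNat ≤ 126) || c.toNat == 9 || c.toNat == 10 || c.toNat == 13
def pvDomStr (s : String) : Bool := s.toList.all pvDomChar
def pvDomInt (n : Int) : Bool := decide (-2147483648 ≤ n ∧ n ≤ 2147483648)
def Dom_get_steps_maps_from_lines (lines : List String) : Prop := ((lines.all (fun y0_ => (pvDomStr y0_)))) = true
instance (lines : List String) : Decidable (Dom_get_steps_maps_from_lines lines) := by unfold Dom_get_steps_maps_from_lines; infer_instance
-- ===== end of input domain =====

-- B replaces A's index/reset state machine with an explicit split-into-runs-then-process decomposition (alternative, same cost).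


-- ===== PORT A =====
-- [int(c) for c in line.split() if c.isdigit()]; int() cannot fail under the isdigit guard (exact on ASCII), so getD 0 is unreachable
def pvRowA (line : String) : List Int :=
  ((PySem.Str.split₀ line).filter (fun c => PySem.Str.strIsdigit c)).map
    (fun c => (PySem.Int.ofStr? c).getD 0)

-- the for-loop with its (steps, index) state; steps[-1].append(row) = dropLast ++ [last ++ [row]]
def pvLoopA : List String → List (List (List Int)) → Int → List (List (List Int))
  | [], steps, _ => steps
  | line :: rest, steps, index =>
    if line ≠ "" then
      let steps1 := if index == 0 then steps ++ [[]] else steps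
      let steps2 := if index > 0 then steps1.dropLast ++ [(steps1.getLast?.getD []) ++ [pvRowA line]] else steps1
      pvLoopA rest steps2 (index + 1)
    else
      pvLoopA rest steps 0

def get_steps_maps_from_lines (lines : List String) : List (List (List Int)) :=
  pvLoopA lines [] 0

-- ===== PORT B =====
def pvRowB (line : String) : List Int :=
  (PySem.Str.split₀ line).filterMap
    (fun c => if PySem.Str.strIsdigit c then some ((PySem.Int.ofStr? c).getD 0) else none)

-- phase 1: maximal runs of consecutive non-empty lines (run = current accumulator)
def pvGroups : List String → List String → List (List String)
  | [], run => if run = [] then [] else [run]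
  | line :: rest, run =>
    if line = "" then
      (if run = [] then pvGroups rest [] else run :: pvGroups rest [])
    else
      pvGroups rest (run ++ [line])

-- phase 2: each run becomes a block: drop the header, parse the rest
def get_steps_maps_from_lines_alt (lines : List String) : List (List (List Int)) :=
  (pvGroups lines []).map (fun g => (g.drop 1).map pvRowB)

-- ===== PRECONDITION & SPEC =====
def Spec_get_steps_maps_from_lines (lines : List String) (out : List (List (List Int))) : Prop := out = get_steps_maps_from_lines_alt lines
instance (lines : List String) (out : List (List (List Int))) : Decidable (Spec_get_steps_maps_from_lines lines out) := by unfold Spec_get_steps_maps_from_lines; infer_instance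

-- ===== CLAIM (what is proved, stated in full; the proofs are below) =====
def Claim_equal_get_steps_maps_from_lines : Prop := ∀ (lines : List String), Dom_get_steps_maps_from_lines lines → Spec_get_steps_maps_from_lines lines (get_steps_maps_from_lines lines)

-- ===== LEMMAS AND PROOFS =====

theorem pvRow_eq (line : String) : pvRowA line = pvRowB line := by
  unfold pvRowA pvRowB
  induction PySem.Str.split₀ line with
  | nil => rfl
  | cons c cs ih =>
    by_cases h : PySem.Str.strIsdigit c = true <;>
      simp only [List.filter_cons, List.filterMap_cons, h, if_pos,
        ite_false, Bool.false_eq_true, List.map_cons, ih]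

-- loop invariant: A's state (steps ++ current partial block, index = run length)
-- corresponds to B's (groups done, current run)
theorem pvLoop_key (rest : List String) :
    ∀ (steps : List (List (List Int))) (run : List String),
      pvLoopA rest (steps ++ if run = [] then [] else [(run.drop 1).map pvRowA]) (run.length : Int)
        = steps ++ (pvGroups rest run).map (fun g => (g.drop 1).map pvRowA) := by
  induction rest with
  | nil =>
    intro steps run
    by_cases h : run = [] <;> simp [pvLoopA, pvGroups, h]
  | cons line rest ih =>
    intro steps run
    by_cases hl : line = ""
    · subst hl
      by_cases h : run = []
      · simpa [pvLoopA, pvGroups, h] using ih steps []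
      · have := ih (steps ++ [(run.drop 1).map pvRowA]) []
        simp only [if_pos rfl, List.append_nil, List.length_nil, Nat.cast_zero,
          List.append_assoc, List.singleton_append] at this
        simpa [pvLoopA, pvGroups, h] using this
    · by_cases h : run = []
      · subst h
        have := ih steps [line]
        simp only [List.length_cons, List.length_nil] at this
        simp only [pvLoopA, pvGroups, hl, ne_eq, not_false_iff, if_true, if_neg hl] at this ⊢
        simpa using this
      · have := ih steps (run ++ [line])
        have hne : run.length ≠ 0 := by simpa using h
        have hdrop : (run ++ [line]).drop 1 = run.drop 1 ++ [line] := by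
          cases run with
          | nil => exact absurd rfl h
          | cons a as => simp
        have hbeq : ((run.length : Int) == 0) = false := by
          simp only [beq_eq_false_iff_ne, ne_eq]
          omega
        have hgt : (0 : Int) < (run.length : Int) := by omega
        simp only [pvLoopA, pvGroups, hl, ne_eq, not_false_iff, if_true, if_neg hl,
          if_neg h, hbeq, Bool.false_eq_true, if_false, if_pos hgt,
          List.dropLast_concat, List.getLast?_concat, Option.getD_some] at this ⊢
        simp only [hdrop, List.map_append, List.length_append, List.length_cons,
          List.length_nil, Nat.cast_add, Nat.cast_one] at this
        simpa [List.append_assoc] using this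

theorem pvLoop_total (lines : List String) :
    get_steps_maps_from_lines lines = get_steps_maps_from_lines_alt lines := by
  have := pvLoop_key lines [] []
  simp only [get_steps_maps_from_lines, get_steps_maps_from_lines_alt]
  simp only [List.nil_append, List.length_nil, Nat.cast_zero] at this
  exact this.trans (by simp [funext pvRow_eq])

-- ===== VERDICT (by name: the statement is the Claim_ definition above) =====
theorem get_steps_maps_from_lines_spec : Claim_equal_get_steps_maps_from_lines := by
  intro lines _
  exact pvLoop_total lines
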